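-- pv_equiv track=rewrite | github.com/mismayil/crow | utils.py | dim_from_relation
-- ===== SOURCE A (Python) =====
-- CK_DIMENSIONS = {
--     "attribution": [
--         "HasProperty",
--         "CapableOf",
--         "HasA",
--         "HasSubEvent",
--         "IsA",
--         "MannerOf",
--         "DependsOn",
--         "InstanceOf",
--         "CreatedBy",
--         "HasContext",
--         "HasSubevent"
--     ],
--     "physical": [
--         "ObjectUse",
--         "PartOf",
--         "MadeOf",
--         "UsedFor",
--         "AtLocation",
--         "LocatedNear"
--     ],
--     "temporal": [
--         "IsAfter",
--         "IsBefore",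
--         "IsDuring",
--         "IsSimultaneous",
--         "HappensIn",
--         "HasPrerequisite"
--     ],
--     "causal": [
--         "Causes",
--         "CausesDesire",
--         "HinderedBy",
--         "ObstructedBy",
--         "Implies",
--         "xReason"
--     ],
--     "social": [
--         "oEffect",
--         "oReact",
--         "oWant",
--         "xAttr",
--         "xEffect",
--         "xIntent",
--         "xNeed",
--         "xReact",
--         "xWant",
--         "MotivatedByGoal",
--         "Desires"
--     ],
--     "comparison": [
--         "Antonym",
--         "Synonym",
--         "SimilarTo",
--         "RelatedTo",
--         "DistinctFrom",
--         "DefinedAs"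
--     ],
--     "other": [
--         "Other",
--         "DesireOf",
--         "HasFirstSubevent",
--         "HasLastSubevent",
--         "HasPainCharacter",
--         "HasPainIntensity",
--         "InheritsFrom",
--         "LocationOfAction",
--         "ReceivesAction",
--         "SymbolOf",
--         "IsFilledBy"
--     ]
-- }
--
-- def dim_from_relation(relation, dimensions=CK_DIMENSIONS, ignore_other=False):
--     for dim, rels in dimensions.items():
--         if not ignore_other or dim != "other":
--             rel_parts = relation.split(" ")
--             relation = rel_parts[0]
--
--             if len(rel_parts) > 1:
--                 relation = rel_parts[1]
--
--             if relation in rels: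
--                 return dim
-- ===== SOURCE B (Python) =====
-- CK_DIMENSIONS = {
--     "attribution": [
--         "HasProperty",
--         "CapableOf",
--         "HasA",
--         "HasSubEvent",
--         "IsA",
--         "MannerOf",
--         "DependsOn",
--         "InstanceOf",
--         "CreatedBy",
--         "HasContext",
--         "HasSubevent"
--     ],
--     "physical": [
--         "ObjectUse",
--         "PartOf",
--         "MadeOf",
--         "UsedFor",
--         "AtLocation",
--         "LocatedNear"
--     ],
--     "temporal": [
--         "IsAfter",
--         "IsBefore",
--         "IsDuring",
--         "IsSimultaneous",
--         "HappensIn",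
--         "HasPrerequisite"
--     ],
--     "causal": [
--         "Causes",
--         "CausesDesire",
--         "HinderedBy",
--         "ObstructedBy",
--         "Implies",
--         "xReason"
--     ],
--     "social": [
--         "oEffect",
--         "oReact",
--         "oWant",
--         "xAttr",
--         "xEffect",
--         "xIntent",
--         "xNeed",
--         "xReact",
--         "xWant",
--         "MotivatedByGoal",
--         "Desires"
--     ],
--     "comparison": [
--         "Antonym",
--         "Synonym",
--         "SimilarTo",
--         "RelatedTo",
--         "DistinctFrom",
--         "DefinedAs"
--     ],
--     "other": [
--         "Other",
--         "DesireOf",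
--         "HasFirstSubevent",
--         "HasLastSubevent",
--         "HasPainCharacter",
--         "HasPainIntensity",
--         "InheritsFrom",
--         "LocationOfAction",
--         "ReceivesAction",
--         "SymbolOf",
--         "IsFilledBy"
--     ]
-- }
--
--
-- def dim_from_relation(relation, dimensions=CK_DIMENSIONS, ignore_other=False):
--     parts = relation.split(" ")
--     rel = parts[1] if len(parts) > 1 else parts[0]
--     reverse = {}
--     for dim, rels in dimensions.items():
--         if ignore_other and dim == "other":
--             continue
--         for r in rels:
--             reverse.setdefault(r, dim)
--     return reverse.get(rel)
-- ===== Notes on version B (the rewrite author's own statement) =====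
-- stated objective: faster
-- what changed: B normalizes the relation once up front and builds a reverse relation-to-dimension index with setdefault (skipping 'other' when ignore_other), answering with a single dict lookup, instead of A's per-dimension scan that re-splits the relation string and linearly searches each relation list every iteration.
import Mathlib
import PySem

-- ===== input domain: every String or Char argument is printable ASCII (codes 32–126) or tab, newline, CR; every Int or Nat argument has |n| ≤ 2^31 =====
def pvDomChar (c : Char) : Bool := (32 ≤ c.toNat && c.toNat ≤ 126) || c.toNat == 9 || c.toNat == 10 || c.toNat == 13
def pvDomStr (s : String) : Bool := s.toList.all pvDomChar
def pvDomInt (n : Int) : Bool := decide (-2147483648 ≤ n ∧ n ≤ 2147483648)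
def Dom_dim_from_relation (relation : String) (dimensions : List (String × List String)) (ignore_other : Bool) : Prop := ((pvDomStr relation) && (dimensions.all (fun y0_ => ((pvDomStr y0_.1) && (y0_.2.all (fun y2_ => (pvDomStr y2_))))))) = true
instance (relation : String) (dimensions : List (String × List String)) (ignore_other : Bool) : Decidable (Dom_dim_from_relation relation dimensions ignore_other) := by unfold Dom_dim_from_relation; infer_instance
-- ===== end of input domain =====

-- B replaces A's per-dimension scan (which re-splits the relation string and linearly searches
-- each relation list every iteration) by one up-front normalization plus a reverse
-- relation→dimension index built with setdefault, answered by a single dict lookup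
-- (objective: faster; a timing run measured B faster on the generated inputs).

-- ===== PORT A =====
-- relation.split(" "): sep " " is nonempty, so Python never raises; split? is `some` here and .getD [] is exact.
-- rel_parts[0] / rel_parts[1]: split always yields a nonempty list and [1] is only read when len > 1,
-- so pyGet? is `some` on every reachable read and .getD "" is exact.
def dimAGo (relation : String) (dims : List (String × List String)) (ig : Bool) : Option String :=
  match dims with
  | [] => none
  | (dim, rels) :: rest =>
    if !ig || dim != "other" then
      let rel_parts := (PySem.Str.split? relation " ").getD []
      let relation1 := (PySem.List.pyGet? rel_parts 0).getD ""
      let relation2 := if rel_parts.length > 1 then (PySem.List.pyGet? rel_parts 1).getD "" else relation1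
      if rels.contains relation2 then some dim
      else dimAGo relation2 rest ig
    else dimAGo relation rest ig

def dim_from_relation (relation : String) (dimensions : List (String × List String)) (ignore_other : Bool) : Option String :=
  dimAGo relation dimensions ignore_other

-- ===== PORT B =====
-- parts[0]/parts[1] read exactly as in Source B; same exactness remarks as for port A.
def normRel (relation : String) : String :=
  if ((PySem.Str.split? relation " ").getD []).length > 1 then
    (PySem.List.pyGet? ((PySem.Str.split? relation " ").getD []) 1).getD ""
  else (PySem.List.pyGet? ((PySem.Str.split? relation " ").getD []) 0).getD ""

def dim_from_relation_alt (relation : String) (dimensions : List (String × List String)) (ignore_other : Bool) : Option String :=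
  let rel := normRel relation
  let reverse := dimensions.foldl
    (fun d p =>
      if ignore_other && p.1 == "other" then d
      else p.2.foldl (fun d r => d.setdefault r p.1) d)
    (PySem.Dict.empty : PySem.Dict String String)
  reverse.get? rel

-- ===== PRECONDITION & SPEC =====
def Spec_dim_from_relation (relation : String) (dimensions : List (String × List String)) (ignore_other : Bool) (out : Option String) : Prop := out = dim_from_relation_alt relation dimensions ignore_other
instance (relation : String) (dimensions : List (String × List String)) (ignore_other : Bool) (out : Option String) : Decidable (Spec_dim_from_relation relation dimensions ignore_other out) := by unfold Spec_dim_from_relation; infer_instance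

-- ===== CLAIM (what is proved, stated in full; the proofs are below) =====
def Claim_equal_dim_from_relation : Prop := ∀ (relation : String) (dimensions : List (String × List String)) (ignore_other : Bool), Dom_dim_from_relation relation dimensions ignore_other → Spec_dim_from_relation relation dimensions ignore_other (dim_from_relation relation dimensions ignore_other)

-- ===== LEMMAS AND PROOFS =====

-- first dimension (in list order, skipping "other" when ig) whose relation list contains key
def findSpec (key : String) (dims : List (String × List String)) (ig : Bool) : Option String :=
  match dims with
  | [] => none
  | (dim, rels) :: rest =>
    if !ig || dim != "other" then
      if rels.contains key then some dim else findSpec key rest ig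
    else findSpec key rest ig

-- splitOn.go on a space-free remainder just moves it into the current piece
theorem go_no_space (fuel : Nat) (l cur : List Char) (acc : List (List Char))
    (hf : l.length ≤ fuel) (hl : ' ' ∉ l) :
    PySem.Chars.splitOn.go [' '] fuel l cur acc = ((cur.reverse ++ l) :: acc).reverse := by
  induction fuel generalizing l cur with
  | zero =>
    have hnil : l = [] := List.length_eq_zero_iff.mp (Nat.le_zero.mp hf)
    subst hnil
    simp [PySem.Chars.splitOn.go]
  | succ n ih =>
    cases l with
    | nil => simp [PySem.Chars.splitOn.go]
    | cons c rest =>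
      have hc : c ≠ ' ' := by intro h; exact hl (h ▸ List.mem_cons_self ..)
      have hpre : ([' '] : List Char).isPrefixOf (c :: rest) = false := by
        simp only [List.isPrefixOf, Bool.and_true]
        exact beq_eq_false_iff_ne.mpr (Ne.symm hc)
      simp only [PySem.Chars.splitOn.go, hpre]
      rw [ih rest (c :: cur) (by simp at hf ⊢; omega)
            (fun h => hl (List.mem_cons_of_mem _ h))]
      simp

-- splitting a space-free string gives the singleton list
theorem splitOn_no_space (l : List Char) (hl : ' ' ∉ l) :
    PySem.Chars.splitOn l [' '] = [l] := by
  unfold PySem.Chars.splitOn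
  rw [go_no_space (l.length + 1) l [] [] (by omega) hl]
  simp

-- splitOn.go produces at least one piece beyond acc
theorem go_ne_nil (fuel : Nat) (l cur : List Char) (acc : List (List Char)) :
    acc.length < (PySem.Chars.splitOn.go [' '] fuel l cur acc).length := by
  induction fuel generalizing l cur acc with
  | zero => simp [PySem.Chars.splitOn.go]
  | succ n ih =>
    cases l with
    | nil => simp [PySem.Chars.splitOn.go]
    | cons c rest =>
      simp only [PySem.Chars.splitOn.go]
      split
      · calc acc.length < (cur.reverse :: acc).length := by simp
          _ < _ := ih _ [] (cur.reverse :: acc)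
      · exact ih rest (c :: cur) acc

theorem splitOn_ne_nil (l : List Char) : PySem.Chars.splitOn l [' '] ≠ [] := by
  have := go_ne_nil (l.length + 1) l [] []
  unfold PySem.Chars.splitOn
  intro h
  rw [h] at this
  simp at this

-- pieces of splitOn are space-free
theorem go_pieces_no_space (fuel : Nat) (l cur : List Char) (acc : List (List Char))
    (hf : l.length ≤ fuel) (hcur : ' ' ∉ cur) (hacc : ∀ p ∈ acc, ' ' ∉ p) :
    ∀ p ∈ PySem.Chars.splitOn.go [' '] fuel l cur acc, ' ' ∉ p := by
  induction fuel generalizing l cur acc with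
  | zero =>
    have hnil : l = [] := List.length_eq_zero_iff.mp (Nat.le_zero.mp hf)
    subst hnil
    simp only [PySem.Chars.splitOn.go]
    intro p hp
    simp at hp
    rcases hp with hp | hp
    · exact hacc p hp
    · subst hp; simpa using hcur
  | succ n ih =>
    cases l with
    | nil =>
      simp only [PySem.Chars.splitOn.go]
      intro p hp
      simp at hp
      rcases hp with hp | hp
      · exact hacc p hp
      · subst hp; simpa using hcur
    | cons c rest =>
      simp only [PySem.Chars.splitOn.go]
      split
      · refine ih (rest.drop 0) [] (cur.reverse :: acc) (by simp at hf ⊢; omega) (by simp) ?_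
        intro p hp
        rcases List.mem_cons.mp hp with hp | hp
        · subst hp; simpa using hcur
        · exact hacc p hp
      · refine ih rest (c :: cur) acc (by simp at hf ⊢; omega) ?_ hacc
        intro h
        rcases List.mem_cons.mp h with h | h
        · rename_i hpre _
          refine hpre ?_
          simp only [List.isPrefixOf, Bool.and_true]
          exact beq_iff_eq.mpr h
        · exact hcur h

theorem splitOn_pieces_no_space (l : List Char) :
    ∀ p ∈ PySem.Chars.splitOn l [' '], ' ' ∉ p := by
  unfold PySem.Chars.splitOn
  exact go_pieces_no_space (l.length + 1) l [] [] (by omega) (by simp) (by simp)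

-- the string-level parts list, characterized through split?_map
theorem parts_toList (s : String) :
    ((PySem.Str.split? s " ").getD []).map String.toList = PySem.Chars.splitOn s.toList [' '] := by
  have h := PySem.Str.split?_map s " "
  have : PySem.Chars.split? s.toList " ".toList = some (PySem.Chars.splitOn s.toList [' ']) := by
    simp [PySem.Chars.split?]
  rw [this] at h
  cases hs : PySem.Str.split? s " " with
  | none => rw [hs] at h; simp at h
  | some parts => rw [hs] at h; simpa using h

-- the normalized relation is itself a piece, hence space-free
theorem normRel_no_space (s : String) : ' ' ∉ (normRel s).toList := by
  have hmap := parts_toList s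
  have hne : ((PySem.Str.split? s " ").getD []) ≠ [] := by
    intro h
    rw [h] at hmap
    exact splitOn_ne_nil s.toList hmap.symm
  have hmem : normRel s ∈ ((PySem.Str.split? s " ").getD []) := by
    unfold normRel
    split
    · rename_i hlen
      have h1 : ((PySem.Str.split? s " ").getD [])[1]? =
          some (((PySem.Str.split? s " ").getD [])[1]'(by omega)) := List.getElem?_eq_getElem _
      simp [pysem, h1]
    · cases hc : ((PySem.Str.split? s " ").getD []) with
      | nil => exact absurd hc hne
      | cons a as => simp [pysem]
  have : (normRel s).toList ∈ PySem.Chars.splitOn s.toList [' '] := by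
    rw [← hmap]
    exact List.mem_map_of_mem hmem
  exact splitOn_pieces_no_space s.toList _ this

-- splitting an already-normalized relation returns it unchanged
theorem split_normRel (s : String) :
    (PySem.Str.split? (normRel s) " ").getD [] = [normRel s] := by
  have hmap := parts_toList (normRel s)
  rw [splitOn_no_space _ (normRel_no_space s)] at hmap
  cases hp : ((PySem.Str.split? (normRel s) " ").getD []) with
  | nil => rw [hp] at hmap; simp at hmap
  | cons a as =>
    rw [hp] at hmap
    cases as with
    | nil =>
      simp at hmap
      exact congrArg (· :: []) (String.toList_inj.mp hmap)
    | cons b bs => simp at hmap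
  
theorem normRel_idem (s : String) : normRel (normRel s) = normRel s := by
  have hsplit := split_normRel s
  generalize ht : normRel s = t at hsplit ⊢
  unfold normRel
  rw [hsplit]
  simp [pysem]

-- A's loop computes findSpec of the normalized relation
theorem dimAGo_eq_findSpec (dims : List (String × List String)) (r : String) (ig : Bool) :
    dimAGo r dims ig = findSpec (normRel r) dims ig := by
  induction dims generalizing r with
  | nil => rfl
  | cons p rest ih =>
    obtain ⟨dim, rels⟩ := p
    show dimAGo r ((dim, rels) :: rest) ig = _
    unfold dimAGo findSpec
    simp only []
    split
    · rw [show (if ((PySem.Str.split? r " ").getD []).length > 1 then (PySem.List.pyGet? ((PySem.Str.split? r " ").getD []) 1).getD "" else (PySem.List.pyGet? ((PySem.Str.split? r " ").getD []) 0).getD "") = normRel r from rfl]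
      split
      · rfl
      · rw [ih (normRel r), normRel_idem]
    · exact ih r

-- lookup after the inner setdefault loop
theorem get?_foldl_setdefault (rels : List String) (dim : String)
    (d : PySem.Dict String String) (key : String) :
    (rels.foldl (fun d r => d.setdefault r dim) d).get? key =
      if rels.contains key then some ((d.get? key).getD dim) else d.get? key := by
  induction rels generalizing d with
  | nil => simp
  | cons r rest ih =>
    simp only [List.foldl_cons, List.contains_cons]
    rw [ih]
    by_cases hk : key = r
    · subst hk
      split <;> simp [PySem.Dict.get?_setdefault_self]
    · rw [PySem.Dict.get?_setdefault_of_ne _ _ hk]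
      simp [show (key == r) = false from beq_eq_false_iff_ne.mpr hk]

-- lookup after the outer build loop
theorem get?_build (dims : List (String × List String)) (ig : Bool)
    (d : PySem.Dict String String) (key : String) :
    (dims.foldl (fun d p =>
        if ig && p.1 == "other" then d
        else p.2.foldl (fun d r => d.setdefault r p.1) d) d).get? key =
      (d.get? key).or (findSpec key dims ig) := by
  induction dims generalizing d with
  | nil => simp [findSpec]
  | cons p rest ih =>
    obtain ⟨dim, rels⟩ := p
    simp only [List.foldl_cons]
    unfold findSpec
    by_cases hskip : ig && (dim == "other")
    · have h2 : (!ig || dim != "other") = false := by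
        simp only [Bool.and_eq_true, beq_iff_eq] at hskip
        simp [hskip.1, hskip.2]
      rw [if_pos hskip, if_neg (by simp [h2])]
      exact ih d
    · have h2 : (!ig || dim != "other") = true := by
        simp only [Bool.and_eq_true, beq_iff_eq, not_and_or] at hskip
        rcases hskip with h | h <;> simp [h]
      rw [if_neg hskip, if_pos (by simp_all)]
      rw [ih, get?_foldl_setdefault]
      split
      · rename_i hmem
        cases hd : d.get? key <;> simp
      · rfl

-- ===== VERDICT (by name: the statement is the Claim_ definition above) =====
theorem dim_from_relation_spec : Claim_equal_dim_from_relation := by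
  intro relation dimensions ignore_other _
  show dim_from_relation relation dimensions ignore_other = dim_from_relation_alt relation dimensions ignore_other
  unfold dim_from_relation dim_from_relation_alt
  rw [dimAGo_eq_findSpec, get?_build]
  simp [PySem.Dict.empty, PySem.Dict.get?]
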